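-- pv_equiv track=rewrite | github.com/jandorn/zotero-to-md | src/zotero_to_md/extract_pdf.py | _shift_ascii_segment
-- ===== SOURCE A (Python) =====
-- _SHIFTED_ASCII_OFFSET = 29
--
-- def _shift_ascii_segment(segment: str) -> str:
--     repaired: list[str] = []
--     for char in segment:
--         codepoint = ord(char)
--         if codepoint < 128:
--             shifted = codepoint + _SHIFTED_ASCII_OFFSET
--             repaired.append(chr(shifted) if shifted <= 126 else char)
--         else:
--             repaired.append(char)
--     return "".join(repaired)
-- ===== SOURCE B (Python) =====
-- _SHIFTED_ASCII_OFFSET = 29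
--
-- # Precomputed translation table: codepoints 0..97 are exactly those with
-- # cp < 128 and cp + 29 <= 126; everything else passes through unchanged.
-- _TABLE = {cp: cp + _SHIFTED_ASCII_OFFSET for cp in range(98)}
--
-- def _shift_ascii_segment(segment: str) -> str:
--     return segment.translate(_TABLE)
-- ===== Notes on version B (the rewrite author's own statement) =====
-- stated objective: faster
-- what changed: Replaces the explicit per-character loop with branch-and-append by a precomputed translation table (dict of the 98 shiftable codepoints) applied via str.translate in one pass.
import Mathlib
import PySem

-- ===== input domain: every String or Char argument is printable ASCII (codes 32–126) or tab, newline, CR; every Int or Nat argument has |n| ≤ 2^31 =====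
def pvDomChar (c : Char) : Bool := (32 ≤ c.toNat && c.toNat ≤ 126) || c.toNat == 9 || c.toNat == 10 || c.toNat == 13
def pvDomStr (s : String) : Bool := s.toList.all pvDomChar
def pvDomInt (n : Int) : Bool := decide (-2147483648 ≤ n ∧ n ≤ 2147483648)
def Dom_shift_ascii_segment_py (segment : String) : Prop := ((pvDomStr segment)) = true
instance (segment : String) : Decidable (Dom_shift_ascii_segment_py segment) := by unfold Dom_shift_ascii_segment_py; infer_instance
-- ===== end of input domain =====

-- B replaces A's per-character branch-and-append loop by a precomputed
-- translation table (codepoints 0..97 ↦ cp+29) applied in one pass via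
-- str.translate; same O(n) asymptotics, measurably faster by constant factor.

-- ===== PORT A =====
def shift_ascii_segment_py (segment : String) : String :=
  String.mk (segment.toList.foldl (fun repaired char =>
    let codepoint : Int := char.toNat
    if codepoint < 128 then
      let shifted : Int := codepoint + 29
      repaired ++ [if shifted ≤ 126 then Char.ofNat shifted.toNat else char]
    else
      repaired ++ [char]) [])

-- ===== PORT B =====
-- the table {cp: cp + 29 for cp in range(98)}
def pvShiftTable : PySem.Dict Int Int :=
  (PySem.List.pyRange 0 98 1).foldl (fun d cp => d.insert cp (cp + 29)) PySem.Dict.empty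

-- segment.translate(_TABLE): look each codepoint up; absent keys pass through
def shift_ascii_segment_py_alt (segment : String) : String :=
  String.mk (segment.toList.map (fun char =>
    match pvShiftTable.get? (char.toNat : Int) with
    | some v => Char.ofNat v.toNat
    | none => char))

-- ===== PRECONDITION & SPEC =====
def Spec_shift_ascii_segment_py (segment : String) (out : String) : Prop := out = shift_ascii_segment_py_alt segment
instance (segment : String) (out : String) : Decidable (Spec_shift_ascii_segment_py segment out) := by unfold Spec_shift_ascii_segment_py; infer_instance

-- ===== CLAIM (what is proved, stated in full; the proofs are below) =====
def Claim_equal_shift_ascii_segment_py : Prop := ∀ (segment : String), Dom_shift_ascii_segment_py segment → Spec_shift_ascii_segment_py segment (shift_ascii_segment_py segment)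

-- ===== LEMMAS AND PROOFS =====

-- the dict built from range(n) maps k ↦ k+29 for 0 ≤ k < n and nothing else
theorem pvShiftTable_partial_get (n : Nat) (k : Int) :
    ((PySem.List.pyRange 0 n 1).foldl (fun d cp => d.insert cp (cp + 29)) PySem.Dict.empty).get? k
      = if 0 ≤ k ∧ k < n then some (k + 29) else none := by
  induction n with
  | zero => simp [PySem.List.pyRange_one_eq_nil, PySem.Dict.get?_empty]
  | succ m ih =>
    have h : ((m : Int)) ≤ ((m : Int) + 1) := by omega
    have hr : PySem.List.pyRange 0 ((m : Nat) + 1 : Nat) 1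
        = PySem.List.pyRange 0 (m : Nat) 1 ++ [(m : Int)] := by
      have := PySem.List.pyRange_one_succ_right (a := 0) (b := (m : Int)) (by positivity)
      simpa using this
    rw [hr, List.foldl_append]
    simp only [List.foldl_cons, List.foldl_nil]
    rw [PySem.Dict.get?_insert, ih]
    split_ifs with h1 h2 h3 <;> first
      | rfl
      | (exfalso; omega)
      | (subst h1; rfl)

theorem pvShiftTable_get (k : Int) :
    pvShiftTable.get? k = if 0 ≤ k ∧ k < 98 then some (k + 29) else none := by
  have := pvShiftTable_partial_get 98 k
  simpa [pvShiftTable] using this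

-- the two per-character transforms agree on every character
theorem pv_pointwise (c : Char) :
    (let codepoint : Int := c.toNat
     if codepoint < 128 then
       let shifted : Int := codepoint + 29
       if shifted ≤ 126 then Char.ofNat shifted.toNat else c
     else c)
    = (match pvShiftTable.get? (c.toNat : Int) with
       | some v => Char.ofNat v.toNat
       | none => c) := by
  rw [pvShiftTable_get]
  by_cases h : (c.toNat : Int) < 98
  · have h0 : (0 : Int) ≤ (c.toNat : Int) ∧ (c.toNat : Int) < 98 := ⟨by positivity, h⟩
    simp only [if_pos h0]
    have h1 : ((c.toNat : Int)) < 128 := by omega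
    have h2 : ((c.toNat : Int)) + 29 ≤ 126 := by omega
    simp [h1, h2]
  · have h0 : ¬ ((0 : Int) ≤ (c.toNat : Int) ∧ (c.toNat : Int) < 98) := by
      intro hc; exact h hc.2
    simp only [if_neg h0]
    by_cases h1 : ((c.toNat : Int)) < 128
    · have h2 : ¬ ((c.toNat : Int) + 29 ≤ 126) := by omega
      simp [h1, h2]
    · simp [h1]

-- A's append-fold is the map of its per-character transform
theorem pv_foldl_eq_map (f : Char → Char) (l : List Char) (acc : List Char) :
    l.foldl (fun r c => r ++ [f c]) acc = acc ++ l.map f := by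
  induction l generalizing acc with
  | nil => simp
  | cons c t ih => simp [ih]

-- ===== VERDICT (by name: the statement is the Claim_ definition above) =====
theorem shift_ascii_segment_py_spec : Claim_equal_shift_ascii_segment_py := by
  intro segment _
  unfold Spec_shift_ascii_segment_py shift_ascii_segment_py shift_ascii_segment_py_alt
  congr 1
  have hfun : (fun (repaired : List Char) (char : Char) =>
      let codepoint : Int := char.toNat
      if codepoint < 128 then
        let shifted : Int := codepoint + 29
        repaired ++ [if shifted ≤ 126 then Char.ofNat shifted.toNat else char]
      else
        repaired ++ [char])
      = (fun (repaired : List Char) (char : Char) => repaired ++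
          [(let codepoint : Int := char.toNat
            if codepoint < 128 then
              let shifted : Int := codepoint + 29
              if shifted ≤ 126 then Char.ofNat shifted.toNat else char
            else char)]) := by
    funext r c
    by_cases h : ((c.toNat : Int)) < 128 <;> simp [h]
  rw [hfun, pv_foldl_eq_map, List.nil_append]
  have hg : (fun (char : Char) =>
      (let codepoint : Int := char.toNat
       if codepoint < 128 then
         let shifted : Int := codepoint + 29
         if shifted ≤ 126 then Char.ofNat shifted.toNat else char
       else char))
      = (fun (char : Char) =>
          match pvShiftTable.get? (char.toNat : Int) with
          | some v => Char.ofNat v.toNat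
          | none => char) := funext pv_pointwise
  rw [hg]
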